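-- pv_equiv track=rewrite | github.com/rdtriwidia-dev/algoritma-pemrograman-1B-2025 | modul-6/modul-6/250441100152_TriWidiaRiandiva/tugas2.py | gabungan_urut
-- ===== SOURCE A (Python) =====
-- def gabungan_urut(t1, t2):
--     gabung = list (t1 + t2)
--
--     angka_tanpa_duplikat = []
--     for angka in gabung:
--         if angka not in angka_tanpa_duplikat:
--             angka_tanpa_duplikat.append(angka)
--
--     for i in range(len(angka_tanpa_duplikat)):
--         for j in range(i + 1, len(angka_tanpa_duplikat)):
--             if angka_tanpa_duplikat[j] > angka_tanpa_duplikat[i]: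
--                 angka_tanpa_duplikat[i], angka_tanpa_duplikat[j] = angka_tanpa_duplikat[j], angka_tanpa_duplikat[i]
--
--     return tuple(angka_tanpa_duplikat)
-- ===== SOURCE B (Python) =====
-- def gabungan_urut(t1, t2):
--     merged = sorted(t1 + t2, reverse=True)
--     result = []
--     for x in merged:
--         if not result or x != result[-1]:
--             result.append(x)
--     return tuple(result)
-- ===== Notes on version B (the rewrite author's own statement) =====
-- stated objective: faster
-- what changed: A dedups with an O(n^2) membership scan and then sorts with O(n^2) nested swap loops; B sorts the merged list descending once (O(n log n)) and removes duplicates in a single adjacent-equality pass.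
import Mathlib
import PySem

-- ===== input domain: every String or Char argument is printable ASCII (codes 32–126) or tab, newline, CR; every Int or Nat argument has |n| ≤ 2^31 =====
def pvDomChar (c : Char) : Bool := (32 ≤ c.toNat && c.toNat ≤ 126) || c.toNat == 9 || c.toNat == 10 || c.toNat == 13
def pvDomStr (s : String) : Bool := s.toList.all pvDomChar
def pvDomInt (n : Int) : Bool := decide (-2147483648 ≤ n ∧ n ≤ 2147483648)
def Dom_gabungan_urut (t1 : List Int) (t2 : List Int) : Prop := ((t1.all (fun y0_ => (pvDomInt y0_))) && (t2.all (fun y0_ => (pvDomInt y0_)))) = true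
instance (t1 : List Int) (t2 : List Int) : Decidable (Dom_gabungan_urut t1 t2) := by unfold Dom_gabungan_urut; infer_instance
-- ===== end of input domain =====

-- B replaces A's O(n²) membership dedup + O(n²) swap sort by sort-descending then one adjacent-dedup pass (simpler, asymptotically faster).

-- ===== PORT A =====
-- first loop: append each element not yet seen
def pvDedupStep (acc : List Int) (angka : Int) : List Int :=
  if angka ∈ acc then acc else acc ++ [angka]

-- inner body of the nested sort loops; indices i, j are always in range in A,
-- where List.getD j 0 / List.getD i 0 are exactly Python's l[j] / l[i]
def pvSwapStep (i : Nat) (l : List Int) (j : Nat) : List Int :=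
  if l.getD j 0 > l.getD i 0 then (l.set i (l.getD j 0)).set j (l.getD i 0) else l

-- for j in range(i+1, n): …
def pvInnerFold (n i : Nat) (l : List Int) : List Int :=
  (List.range' (i+1) (n - (i+1))).foldl (pvSwapStep i) l

-- for i in range(n): …
def pvOuterFold (n : Nat) (l : List Int) : List Int :=
  (List.range n).foldl (fun l i => pvInnerFold n i l) l

def gabungan_urut (t1 : List Int) (t2 : List Int) : List Int :=
  let gabung := t1 ++ t2
  let ded := gabung.foldl pvDedupStep []
  pvOuterFold ded.length ded

-- ===== PORT B =====
-- loop body: append x unless it equals the last kept element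
def pvAppendStep (result : List Int) (x : Int) : List Int :=
  if result = [] ∨ result.getLast? ≠ some x then result ++ [x] else result

def gabungan_urut_alt (t1 : List Int) (t2 : List Int) : List Int :=
  let merged := PySem.List.sorted (t1 ++ t2) (fun x => x) true
  merged.foldl pvAppendStep []

-- ===== PRECONDITION & SPEC =====
def Spec_gabungan_urut (t1 : List Int) (t2 : List Int) (out : List Int) : Prop := out = gabungan_urut_alt t1 t2
instance (t1 : List Int) (t2 : List Int) (out : List Int) : Decidable (Spec_gabungan_urut t1 t2 out) := by unfold Spec_gabungan_urut; infer_instance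

-- ===== CLAIM (what is proved, stated in full; the proofs are below) =====
def Claim_equal_gabungan_urut : Prop := ∀ (t1 : List Int) (t2 : List Int), Dom_gabungan_urut t1 t2 → Spec_gabungan_urut t1 t2 (gabungan_urut t1 t2)

-- ===== LEMMAS AND PROOFS =====

-- A's first loop: nodup accumulator, membership = old ∪ input
theorem pvDedup_spec : ∀ (xs acc : List Int), acc.Nodup →
    (xs.foldl pvDedupStep acc).Nodup ∧
    (∀ y, y ∈ xs.foldl pvDedupStep acc ↔ y ∈ acc ∨ y ∈ xs) := by
  intro xs
  induction xs with
  | nil => intro acc h; exact ⟨h, by simp⟩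
  | cons x xs ih =>
    intro acc h
    simp only [List.foldl_cons, pvDedupStep]
    by_cases hx : x ∈ acc
    · simp only [if_pos hx]
      obtain ⟨h1, h2⟩ := ih acc h
      refine ⟨h1, fun y => ?_⟩
      rw [h2 y]
      constructor
      · rintro (hy | hy)
        · exact Or.inl hy
        · exact Or.inr (List.mem_cons_of_mem _ hy)
      · rintro (hy | hy)
        · exact Or.inl hy
        · rcases List.mem_cons.1 hy with rfl | hy
          · exact Or.inl hx
          · exact Or.inr hy
    · simp only [if_neg hx]
      have hacc : (acc ++ [x]).Nodup := by
        simp only [List.nodup_append, List.nodup_cons, List.not_mem_nil,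
          not_false_iff, List.nodup_nil, and_true, true_and]
        exact ⟨h, fun a ha => by simp; exact fun e => hx (e ▸ ha)⟩
      obtain ⟨h1, h2⟩ := ih (acc ++ [x]) hacc
      refine ⟨h1, fun y => ?_⟩
      rw [h2 y]
      simp [List.mem_append]
      tauto

-- swapping two positions is a permutation
theorem pv_cons_set_perm : ∀ (xs : List Int) (k : Nat) (x : Int), k < xs.length →
    (xs.getD k 0 :: xs.set k x).Perm (x :: xs) := by
  intro xs
  induction xs with
  | nil => intro k x h; simp at h
  | cons y ys ih =>
    intro k x h
    cases k with
    | zero => simpa using List.Perm.swap x y ys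
    | succ k =>
      simp only [List.getD_cons_succ, List.set_cons_succ]
      have := ih k x (by simpa using h)
      have s1 : (ys.getD k 0 :: y :: ys.set k x).Perm (y :: ys.getD k 0 :: ys.set k x) :=
        List.Perm.swap _ _ _
      have s2 : (y :: ys.getD k 0 :: ys.set k x).Perm (y :: x :: ys) := this.cons y
      have s3 : (y :: x :: ys).Perm (x :: y :: ys) := List.Perm.swap _ _ _
      exact (s1.trans s2).trans s3

theorem pv_swap_perm : ∀ (l : List Int) (i j : Nat), i < j → j < l.length →
    ((l.set i (l.getD j 0)).set j (l.getD i 0)).Perm l := by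
  intro l
  induction l with
  | nil => intro i j hij hj; simp at hj
  | cons x xs ih =>
    intro i j hij hj
    cases j with
    | zero => omega
    | succ j =>
      cases i with
      | zero =>
        simp only [List.getD_cons_succ, List.getD_cons_zero, List.set_cons_zero,
          List.set_cons_succ]
        exact pv_cons_set_perm xs j x (by simpa using hj)
      | succ i =>
        simp only [List.getD_cons_succ, List.set_cons_succ]
        exact (ih i j (by omega) (by simpa using hj)).cons x

theorem pvSwapStep_perm (l : List Int) (i j : Nat) (hij : i < j) (hj : j < l.length) :
    (pvSwapStep i l j).Perm l := by
  unfold pvSwapStep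
  split
  · exact pv_swap_perm l i j hij hj
  · exact List.Perm.refl l

theorem pv_getD_set_ne (l : List Int) (i t : Nat) (a : Int) (h : i ≠ t) :
    (l.set i a).getD t 0 = l.getD t 0 := by
  simp [List.getD_eq_getElem?_getD, List.getElem?_set_ne h]

theorem pv_getD_set_self (l : List Int) (i : Nat) (a : Int) (h : i < l.length) :
    (l.set i a).getD i 0 = a := by
  simp [List.getD_eq_getElem?_getD, h]

theorem pvSwapStep_length (l : List Int) (i j : Nat) :
    (pvSwapStep i l j).length = l.length := by
  unfold pvSwapStep; split <;> simp

theorem pvSwapStep_getD_ne (l : List Int) (i j t : Nat) (h1 : t ≠ i) (h2 : t ≠ j) :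
    (pvSwapStep i l j).getD t 0 = l.getD t 0 := by
  unfold pvSwapStep; split
  · rw [pv_getD_set_ne _ _ _ _ (Ne.symm h2), pv_getD_set_ne _ _ _ _ (Ne.symm h1)]
  · rfl

theorem pvSwapStep_getD_le (l : List Int) (i j : Nat) (hij : i < j) (hj : j < l.length) :
    l.getD i 0 ≤ (pvSwapStep i l j).getD i 0 ∧
    (pvSwapStep i l j).getD j 0 ≤ (pvSwapStep i l j).getD i 0 := by
  unfold pvSwapStep; split
  · rename_i hgt
    have hi : i < l.length := lt_trans hij hj
    have e1 : ((l.set i (l.getD j 0)).set j (l.getD i 0)).getD i 0 = l.getD j 0 := by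
      rw [pv_getD_set_ne _ _ _ _ (Nat.ne_of_gt hij)]
      exact pv_getD_set_self _ _ _ hi
    have e2 : ((l.set i (l.getD j 0)).set j (l.getD i 0)).getD j 0 = l.getD i 0 := by
      refine pv_getD_set_self _ _ _ ?_
      simpa using hj
    rw [e1, e2]
    exact ⟨le_of_lt hgt, le_of_lt hgt⟩
  · rename_i hgt
    exact ⟨le_refl _, not_lt.1 hgt⟩

-- inner loop invariant
theorem pvInner_spec : ∀ (k j0 : Nat) (l : List Int) (i : Nat), i < j0 → j0 + k ≤ l.length →
    (((List.range' j0 k).foldl (pvSwapStep i) l).length = l.length) ∧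
    (∀ t, t < i → ((List.range' j0 k).foldl (pvSwapStep i) l).getD t 0 = l.getD t 0) ∧
    (∀ t, i < t → t < j0 → ((List.range' j0 k).foldl (pvSwapStep i) l).getD t 0 = l.getD t 0) ∧
    (((List.range' j0 k).foldl (pvSwapStep i) l).Perm l) ∧
    (l.getD i 0 ≤ ((List.range' j0 k).foldl (pvSwapStep i) l).getD i 0) ∧
    (∀ t, j0 ≤ t → t < j0 + k →
      ((List.range' j0 k).foldl (pvSwapStep i) l).getD t 0 ≤ ((List.range' j0 k).foldl (pvSwapStep i) l).getD i 0) := by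
  intro k
  induction k with
  | zero =>
    intro j0 l i hij hlen
    exact ⟨rfl, fun t _ => rfl, fun t _ _ => rfl, List.Perm.refl l, le_refl _,
      fun t h1 h2 => absurd h2 (by omega)⟩
  | succ k ih =>
    intro j0 l i hij hlen
    have hj0 : j0 < l.length := by omega
    rw [List.range'_succ, List.foldl_cons]
    have hlen' : (pvSwapStep i l j0).length = l.length := pvSwapStep_length l i j0
    have hperm' : (pvSwapStep i l j0).Perm l := pvSwapStep_perm l i j0 hij hj0
    obtain ⟨hle1, hle2⟩ := pvSwapStep_getD_le l i j0 hij hj0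
    obtain ⟨c1, c2, c3, c4, c5, c6⟩ := ih (j0+1) (pvSwapStep i l j0) i (by omega)
      (by rw [hlen']; omega)
    refine ⟨by rw [c1, hlen'], ?_, ?_, c4.trans hperm', le_trans hle1 c5, ?_⟩
    · intro t ht
      rw [c2 t ht, pvSwapStep_getD_ne l i j0 t (by omega) (by omega)]
    · intro t ht1 ht2
      rw [c3 t ht1 (by omega), pvSwapStep_getD_ne l i j0 t (by omega) (by omega)]
    · intro t ht1 ht2
      by_cases hteq : t = j0
      · subst hteq
        rw [c3 t (by omega) (by omega)]
        exact le_trans hle2 c5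
      · exact c6 t (by omega) (by omega)

-- outer loop invariant
theorem pvOuter_spec : ∀ (m i : Nat) (n : Nat) (l : List Int), l.length = n → i + m = n →
    (∀ a b, a < i → a < b → b < n → l.getD b 0 ≤ l.getD a 0) →
    (((List.range' i m).foldl (fun l i => pvInnerFold n i l) l).Perm l) ∧
    (∀ a b, a < b → b < n →
      ((List.range' i m).foldl (fun l i => pvInnerFold n i l) l).getD b 0 ≤
      ((List.range' i m).foldl (fun l i => pvInnerFold n i l) l).getD a 0) := by
  intro m
  induction m with
  | zero =>
    intro i n l hlen hin H
    exact ⟨List.Perm.refl l, fun a b hab hb => H a b (by omega) hab hb⟩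
  | succ m ih =>
    intro i n l hlen hin H
    have hi : i < n := by omega
    have hil : i < l.length := by omega
    rw [List.range'_succ, List.foldl_cons]
    obtain ⟨c1, c2, c3, c4, c5, c6⟩ :=
      pvInner_spec (n - (i+1)) (i+1) l i (by omega) (by omega)
    have hc1 : (pvInnerFold n i l).length = l.length := c1
    have hc4 : (pvInnerFold n i l).Perm l := c4
    have c2' : ∀ t, t < i → (pvInnerFold n i l).getD t 0 = l.getD t 0 := c2
    have c6' : ∀ t, i + 1 ≤ t → t < i + 1 + (n - (i+1)) →
        (pvInnerFold n i l).getD t 0 ≤ (pvInnerFold n i l).getD i 0 := c6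
    have htake : (pvInnerFold n i l).take i = l.take i := by
      apply List.ext_getElem (by simp [hc1])
      intro t h1 h2
      rw [List.getElem_take, List.getElem_take]
      have ht : t < i := by simp at h1; omega
      have htl : t < l.length := by omega
      have := c2 t ht
      rwa [List.getD_eq_getElem _ 0 (by omega), List.getD_eq_getElem _ 0 htl] at this
    have hdrop : ((pvInnerFold n i l).drop i).Perm (l.drop i) := by
      have hp : ((pvInnerFold n i l).take i ++ (pvInnerFold n i l).drop i).Perm
          (l.take i ++ l.drop i) := by
        rw [List.take_append_drop, List.take_append_drop]; exact hc4
      rw [htake] at hp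
      exact (List.perm_append_left_iff _).1 hp
    have key : ∀ b, i ≤ b → b < n → ∃ t, i ≤ t ∧ t < n ∧
        (pvInnerFold n i l).getD b 0 = l.getD t 0 := by
      intro b hb1 hb2
      have hb' : b < (pvInnerFold n i l).length := by omega
      have hmem : (pvInnerFold n i l)[b]'(hb') ∈ (pvInnerFold n i l).drop i := by
        have : ((pvInnerFold n i l).drop i)[b - i]'(by simp; omega) =
            (pvInnerFold n i l)[b]'(hb') := by
          rw [List.getElem_drop]; congr 1; omega
        rw [← this]
        exact List.getElem_mem _
      have hmem2 : (pvInnerFold n i l)[b]'(hb') ∈ l.drop i := hdrop.mem_iff.1 hmem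
      obtain ⟨j, hj, he⟩ := List.mem_iff_getElem.1 hmem2
      have hjl : i + j < l.length := by simp at hj; omega
      refine ⟨i + j, by omega, by omega, ?_⟩
      rw [List.getD_eq_getElem _ 0 hb', List.getD_eq_getElem _ 0 hjl]
      rw [← he, List.getElem_drop]
    have H' : ∀ a b, a < i + 1 → a < b → b < n →
        (pvInnerFold n i l).getD b 0 ≤ (pvInnerFold n i l).getD a 0 := by
      intro a b ha hab hb
      by_cases hai : a < i
      · rw [c2' a hai]
        by_cases hbi : b < i
        · rw [c2' b hbi]; exact H a b hai hab hb
        · obtain ⟨t, ht1, ht2, he⟩ := key b (by omega) hb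
          rw [he]
          exact H a t hai (by omega) ht2
      · have ha' : a = i := by omega
        subst ha'
        exact c6' b (by omega) (by omega)
    obtain ⟨p, pw⟩ := ih (i+1) n (pvInnerFold n i l) (by rw [hc1, hlen]) (by omega) H'
    exact ⟨p.trans hc4, pw⟩

-- A's result: strictly descending, same members as t1 ++ t2
theorem pvA_spec (t1 t2 : List Int) :
    (gabungan_urut t1 t2).Pairwise (fun a b => b < a) ∧
    (∀ y, y ∈ gabungan_urut t1 t2 ↔ y ∈ t1 ++ t2) := by
  obtain ⟨hnd, hmd⟩ := pvDedup_spec (t1 ++ t2) [] List.nodup_nil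
  have hdef : gabungan_urut t1 t2 =
      (List.range' 0 ((t1 ++ t2).foldl pvDedupStep []).length).foldl
        (fun l i => pvInnerFold ((t1 ++ t2).foldl pvDedupStep []).length i l)
        ((t1 ++ t2).foldl pvDedupStep []) := by
    simp only [gabungan_urut, pvOuterFold, List.range_eq_range']
  obtain ⟨hp, hpw⟩ := pvOuter_spec ((t1 ++ t2).foldl pvDedupStep []).length 0
    ((t1 ++ t2).foldl pvDedupStep []).length ((t1 ++ t2).foldl pvDedupStep []) rfl
    (by omega) (fun a b ha => absurd ha (Nat.not_lt_zero a))
  rw [← hdef] at hp hpw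
  have hlen : (gabungan_urut t1 t2).length = ((t1 ++ t2).foldl pvDedupStep []).length :=
    hp.length_eq
  have hnodup : (gabungan_urut t1 t2).Nodup := hp.nodup_iff.2 hnd
  constructor
  · rw [List.pairwise_iff_getElem]
    intro a b ha hb hab
    have h1 := hpw a b hab (by omega)
    rw [List.getD_eq_getElem _ 0 ha, List.getD_eq_getElem _ 0 hb] at h1
    refine lt_of_le_of_ne h1 ?_
    intro e
    exact absurd ((List.Nodup.getElem_inj_iff hnodup).1 e) (by omega)
  · intro y
    rw [hp.mem_iff, hmd y]
    simp

-- B-side: adjacent dedup of a descending chain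
def pvG (y : Int) : List Int → List Int
  | [] => []
  | x :: xs => if x = y then pvG y xs else x :: pvG x xs

theorem pvFoldB_eq : ∀ (xs a : List Int) (y : Int),
    (xs.foldl pvAppendStep (a ++ [y])) = (a ++ [y]) ++ pvG y xs := by
  intro xs
  induction xs with
  | nil => intro a y; simp [pvG]
  | cons x xs ih =>
    intro a y
    simp only [List.foldl_cons, pvG]
    have hlast : (a ++ [y]).getLast? = some y := by simp
    by_cases hxy : x = y
    · subst hxy
      have : pvAppendStep (a ++ [x]) x = a ++ [x] := by
        simp [pvAppendStep, hlast]
      rw [this, if_pos rfl, ih]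
    · have : pvAppendStep (a ++ [y]) x = (a ++ [y]) ++ [x] := by
        simp only [pvAppendStep, hlast]
        rw [if_pos]
        right
        simp [Ne.symm hxy]
      rw [this, if_neg hxy]
      have := ih ((a ++ [y])) x
      rw [List.append_assoc] at this ⊢
      rw [this]
      simp

theorem pvG_spec : ∀ (xs : List Int) (y : Int), (y :: xs).Pairwise (fun a b => b ≤ a) →
    (y :: pvG y xs).Pairwise (fun a b => b < a) ∧
    (∀ z, z ∈ y :: pvG y xs ↔ z ∈ y :: xs) := by
  intro xs
  induction xs with
  | nil => intro y _; simp [pvG]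
  | cons x xs ih =>
    intro y h
    rw [List.pairwise_cons] at h
    obtain ⟨hy, hx⟩ := h
    rw [List.pairwise_cons] at hx
    obtain ⟨hx2, hxs⟩ := hx
    simp only [pvG]
    by_cases hxy : x = y
    · subst hxy
      rw [if_pos rfl]
      have hyxs : (x :: xs).Pairwise (fun a b => b ≤ a) := by
        rw [List.pairwise_cons]
        exact ⟨hx2, hxs⟩
      obtain ⟨h1, h2⟩ := ih x hyxs
      refine ⟨h1, fun z => ?_⟩
      rw [h2 z]
      simp
    · rw [if_neg hxy]
      have hxxs : (x :: xs).Pairwise (fun a b => b ≤ a) := by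
        rw [List.pairwise_cons]
        exact ⟨hx2, hxs⟩
      obtain ⟨h1, h2⟩ := ih x hxxs
      have hyx : x < y := lt_of_le_of_ne (hy x (List.mem_cons_self)) hxy
      constructor
      · rw [List.pairwise_cons]
        refine ⟨fun z hz => ?_, h1⟩
        rcases List.mem_cons.1 ((h2 z).1 hz) with rfl | hz2
        · exact hyx
        · calc z ≤ x := hx2 z hz2
            _ < y := hyx
      · intro z
        simp only [List.mem_cons]
        have := h2 z
        simp only [List.mem_cons] at this
        tauto

theorem pvB_spec (t1 t2 : List Int) :
    (gabungan_urut_alt t1 t2).Pairwise (fun a b => b < a) ∧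
    (∀ y, y ∈ gabungan_urut_alt t1 t2 ↔ y ∈ t1 ++ t2) := by
  unfold gabungan_urut_alt
  simp only
  rcases hs : PySem.List.sorted (t1 ++ t2) (fun x => x) true with _ | ⟨y, xs⟩
  · constructor
    · simp
    · intro z
      have := PySem.List.mem_sorted (xs := t1 ++ t2) (key := fun x => x) (rev := true) (x := z)
      rw [hs] at this
      simp at this ⊢
      tauto
  · have hpw : (y :: xs).Pairwise (fun a b => b ≤ a) := by
      have := PySem.List.sorted_pairwise_rev (xs := t1 ++ t2) (key := fun x => x)
      rw [hs] at this
      exact this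
    have hfold : (y :: xs).foldl pvAppendStep [] = y :: pvG y xs := by
      have h1 : pvAppendStep [] y = [] ++ [y] := by simp [pvAppendStep]
      simp only [List.foldl_cons, h1, pvFoldB_eq]
      simp
    rw [hfold]
    obtain ⟨h1, h2⟩ := pvG_spec xs y hpw
    refine ⟨h1, fun z => ?_⟩
    rw [h2 z]
    have := PySem.List.mem_sorted (xs := t1 ++ t2) (key := fun x => x) (rev := true) (x := z)
    rw [hs] at this
    rw [this]

-- ===== VERDICT (by name: the statement is the Claim_ definition above) =====
theorem gabungan_urut_spec : Claim_equal_gabungan_urut := by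
  intro t1 t2 _
  unfold Spec_gabungan_urut
  obtain ⟨hpa, hma⟩ := pvA_spec t1 t2
  obtain ⟨hpb, hmb⟩ := pvB_spec t1 t2
  have hna : (gabungan_urut t1 t2).Nodup := hpa.imp (fun h => ne_of_gt h)
  have hnb : (gabungan_urut_alt t1 t2).Nodup := hpb.imp (fun h => ne_of_gt h)
  have hperm : (gabungan_urut t1 t2).Perm (gabungan_urut_alt t1 t2) := by
    rw [List.perm_ext_iff_of_nodup hna hnb]
    intro y; rw [hma y, hmb y]
  exact List.Perm.eq_of_pairwise (fun a b _ _ hab hba => absurd hab (not_lt.2 hba.le)) hpa hpb hperm
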